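-- pv_equiv track=rewrite | github.com/rameyjm7/sdr-gateway | app/sdr/soapy_utils.py | parse_find_output
-- ===== SOURCE A (Python) =====
-- def parse_find_output(output: str) -> list[dict[str, str]]:
--     devices: list[dict[str, str]] = []
--     current: dict[str, str] | None = None
--     for raw_line in output.splitlines():
--         line = raw_line.strip()
--         if not line:
--             continue
--         if line.startswith("Found device"):
--             if current:
--                 devices.append(current)
--             current = {}
--             continue
--         if current is None or "=" not in line:
--             continue
--         key, value = line.split("=", 1)
--         current[key.strip().lower()] = value.strip()
--     if current:
--         devices.append(current)
--     return devices
-- ===== SOURCE B (Python) =====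
-- def _scan_block(lines, i):
--     # Consume key=value lines starting at index i until the next device header
--     # (or end of input); return the parsed fields and the index we stopped at.
--     fields = {}
--     while i < len(lines) and not lines[i].startswith("Found device"):
--         line = lines[i]
--         if "=" in line:
--             key, value = line.split("=", 1)
--             fields[key.strip().lower()] = value.strip()
--         i += 1
--     return fields, i
--
--
-- def parse_find_output(output: str) -> list[dict[str, str]]:
--     lines = [ln.strip() for ln in output.splitlines()]
--     n = len(lines)
--     i = 0
--     # skip everything before the first device header
--     while i < n and not lines[i].startswith("Found device"):
--         i += 1
--     devices = []
--     while i < n:  # lines[i] is a device header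
--         fields, i = _scan_block(lines, i + 1)
--         if fields:
--             devices.append(fields)
--     return devices
-- ===== Notes on version B (the rewrite author's own statement) =====
-- stated objective: alternative
-- what changed: Replaced the single-pass Optional-dict state machine (flush current on each header, final flush after the loop) by a strip-all-lines pass followed by a recursive-descent scanner: skip the pre-header prefix, then repeatedly parse one block per header with a dedicated block-scanning helper.
import Mathlib
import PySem

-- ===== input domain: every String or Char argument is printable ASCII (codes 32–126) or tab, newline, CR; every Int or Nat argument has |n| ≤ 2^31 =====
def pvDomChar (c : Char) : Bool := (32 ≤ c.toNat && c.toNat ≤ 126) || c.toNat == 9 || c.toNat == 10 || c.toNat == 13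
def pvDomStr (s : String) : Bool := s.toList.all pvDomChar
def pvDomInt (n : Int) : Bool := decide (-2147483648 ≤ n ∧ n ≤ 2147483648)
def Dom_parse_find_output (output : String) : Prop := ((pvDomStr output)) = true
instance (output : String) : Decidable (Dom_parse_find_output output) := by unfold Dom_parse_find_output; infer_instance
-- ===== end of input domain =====

-- B replaces A's one-pass Optional-dict state machine by a strip-then-recursive-descent
-- scanner (skip prefix, then one block-parsing helper call per header); alternative
-- decomposition, same cost.

-- ===== PORT A =====
def pvStepA (st : List (PySem.Dict String String) × Option (PySem.Dict String String))
    (raw_line : String) :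
    List (PySem.Dict String String) × Option (PySem.Dict String String) :=
  let line := PySem.Str.strip raw_line
  if line = "" then st
  else if PySem.Str.startswith line "Found device" then
    match st with
    | (devices, some cur) =>
        ((if cur.items = [] then devices else devices ++ [cur]), some PySem.Dict.empty)
    | (devices, none) => (devices, some PySem.Dict.empty)
  else
    match st with
    | (devices, none) => (devices, none)
    | (devices, some cur) =>
        if PySem.Str.isIn "=" line then
          match PySem.Str.splitMax? line "=" 1 with
          | some (key :: value :: _) =>
              (devices, some (cur.insert (PySem.Str.lower (PySem.Str.strip key))
                                         (PySem.Str.strip value)))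
          | _ => (devices, some cur)
        else (devices, some cur)

def parse_find_output (output : String) : List (List (String × String)) :=
  let st := (PySem.Str.splitlines output).foldl pvStepA ([], none)
  let devices :=
    match st.2 with
    | some cur => if cur.items = [] then st.1 else st.1 ++ [cur]
    | none => st.1
  devices.map PySem.Dict.items

-- ===== PORT B =====
-- Source B's index-advancing while loops are ported as the obvious structural recursion on
-- the list of remaining lines (i only grows by 1 and only lines[i] is read; exact).
def pvScanBlockB : List String → PySem.Dict String String →
    PySem.Dict String String × List String
  | [], fields => (fields, [])
  | line :: rest, fields =>
    if PySem.Str.startswith line "Found device" then (fields, line :: rest)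
    else
      pvScanBlockB rest
        (if PySem.Str.isIn "=" line then
          match PySem.Str.splitMax? line "=" 1 with
          | some (key :: value :: _) =>
              fields.insert (PySem.Str.lower (PySem.Str.strip key)) (PySem.Str.strip value)
          | _ => fields
        else fields)

theorem pvScanBlockB_len : ∀ (ls : List String) (fields : PySem.Dict String String),
    (pvScanBlockB ls fields).2.length ≤ ls.length := by
  intro ls
  induction ls with
  | nil => intro f; simp [pvScanBlockB]
  | cons l t ih =>
    intro f
    simp only [pvScanBlockB]
    split
    · simp
    · exact Nat.le_succ_of_le (ih _)

def pvSkipB : List String → List String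
  | [] => []
  | line :: rest =>
    if PySem.Str.startswith line "Found device" then line :: rest else pvSkipB rest

def pvBlocksB : List String → List (PySem.Dict String String)
  | [] => []
  | _ :: rest =>
    let res := pvScanBlockB rest PySem.Dict.empty
    (if res.1.items = [] then [] else [res.1]) ++ pvBlocksB res.2
  termination_by ls => ls.length
  decreasing_by
    exact Nat.lt_succ_of_le (pvScanBlockB_len rest PySem.Dict.empty)

def parse_find_output_alt (output : String) : List (List (String × String)) :=
  (pvBlocksB (pvSkipB ((PySem.Str.splitlines output).map PySem.Str.strip))).map
    PySem.Dict.items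

-- ===== PRECONDITION & SPEC =====
-- A is total on ASCII input: Pre_ excludes nothing (it only names the header
-- marker the scanner looks for; every string is admitted).
def Pre_parse_find_output (output : String) : Prop :=
  PySem.Str.startswith "Found device" "Found device" = true

instance (output : String) : Decidable (Pre_parse_find_output output) := by unfold Pre_parse_find_output; infer_instance

def pvWitness_parse_find_output : String :=
  "Found device 0\ndriver = rtlsdr\nlabel = Generic RTL2832U\nserial = 00000001\nFound device 1\ndriver = hackrf"

def Spec_parse_find_output (output : String) (out : List (List (String × String))) : Prop := out = parse_find_output_alt output
instance (output : String) (out : List (List (String × String))) : Decidable (Spec_parse_find_output output out) := by unfold Spec_parse_find_output; infer_instance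

-- ===== CLAIM (what is proved, stated in full; the proofs are below) =====
def Claim_equal_parse_find_output : Prop := ∀ (output : String), Dom_parse_find_output output → Pre_parse_find_output output → Spec_parse_find_output output (parse_find_output output)

-- ===== LEMMAS AND PROOFS =====

-- A's final flush, as a function of the loop state (proof-only helper).
def pvFinalA (st : List (PySem.Dict String String) × Option (PySem.Dict String String)) :
    List (List (String × String)) :=
  (match st.2 with
    | some cur => if cur.items = [] then st.1 else st.1 ++ [cur]
    | none => st.1).map PySem.Dict.items

-- In-block invariant: folding A's step from state (devs, some cur) matches B's
-- block scanner started with fields = cur.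
theorem pv_block : ∀ (ls : List String) (devs : List (PySem.Dict String String))
    (cur : PySem.Dict String String),
    pvFinalA (ls.foldl pvStepA (devs, some cur)) =
      devs.map PySem.Dict.items ++
        ((if (pvScanBlockB (ls.map PySem.Str.strip) cur).1.items = [] then []
            else [(pvScanBlockB (ls.map PySem.Str.strip) cur).1]) ++
          pvBlocksB (pvScanBlockB (ls.map PySem.Str.strip) cur).2).map
            PySem.Dict.items := by
  intro ls
  induction ls with
  | nil =>
    intro devs cur
    simp only [List.foldl_nil, List.map_nil, pvScanBlockB, pvBlocksB, pvFinalA]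
    split_ifs <;> simp
  | cons l t ih =>
    intro devs cur
    simp only [List.foldl_cons, List.map_cons, pvStepA, pvScanBlockB]
    by_cases h0 : PySem.Str.strip l = ""
    · rw [h0]
      rw [show PySem.Str.startswith "" "Found device" = false from by decide,
          show PySem.Str.isIn "=" "" = false from by decide]
      simp only [Bool.false_eq_true, if_false]
      exact ih devs cur
    · rw [if_neg h0]
      by_cases h1 : PySem.Str.startswith (PySem.Str.strip l) "Found device" = true
      · simp only [if_pos h1]
        rw [ih (if cur.items = [] then devs else devs ++ [cur]) PySem.Dict.empty]
        simp only [pvBlocksB]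
        by_cases hc : cur.items = [] <;> simp [hc, List.append_assoc]
      · simp only [if_neg h1]
        by_cases h2 : PySem.Str.isIn "=" (PySem.Str.strip l) = true
        · simp only [if_pos h2]
          generalize PySem.Str.splitMax? (PySem.Str.strip l) "=" 1 = m
          rcases m with _ | ⟨_ | ⟨k, _ | ⟨v, tl⟩⟩⟩ <;> exact ih devs _
        · simp only [if_neg h2]
          exact ih devs cur

-- Prefix invariant: before the first header A's state stays (devs, none); this
-- matches B's skip-prefix phase followed by its block loop.
theorem pv_skip : ∀ (ls : List String) (devs : List (PySem.Dict String String)),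
    pvFinalA (ls.foldl pvStepA (devs, none)) =
      devs.map PySem.Dict.items ++
        (pvBlocksB (pvSkipB (ls.map PySem.Str.strip))).map PySem.Dict.items := by
  intro ls
  induction ls with
  | nil => intro devs; simp [pvFinalA, pvSkipB, pvBlocksB]
  | cons l t ih =>
    intro devs
    simp only [List.foldl_cons, List.map_cons, pvStepA, pvSkipB]
    by_cases h0 : PySem.Str.strip l = ""
    · rw [h0]
      rw [show PySem.Str.startswith "" "Found device" = false from by decide]
      simp only [Bool.false_eq_true, if_false]
      exact ih devs
    · rw [if_neg h0]
      by_cases h1 : PySem.Str.startswith (PySem.Str.strip l) "Found device" = true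
      · simp only [if_pos h1]
        rw [pv_block t devs PySem.Dict.empty]
        simp only [pvBlocksB]
      · simp only [if_neg h1]
        exact ih devs

-- ===== VERDICT (by name: the statement is the Claim_ definition above) =====
theorem parse_find_output_spec : Claim_equal_parse_find_output := by
  intro output _ _
  unfold Spec_parse_find_output parse_find_output parse_find_output_alt
  have h := pv_skip (PySem.Str.splitlines output) []
  simpa [pvFinalA] using h
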